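-- pv_equiv track=rewrite | github.com/Sr-R0b0t/kyc | src/cnpj_parser.py | _get_after
-- ===== SOURCE A (Python) =====
-- def _get_after(label: str, text: str, end_chars=("\n",)):
--     idx = text.find(label)
--     if idx == -1:
--         return ""
--     start = idx + len(label)
--     # pega até o próximo \n
--     end = len(text)
--     for ch in end_chars:
--         tmp = text.find(ch, start)
--         if tmp != -1:
--             end = min(end, tmp)
--     return text[start:end].strip(" :\t")
-- ===== SOURCE B (Python) =====
-- def _get_after(label: str, text: str, end_chars=("\n",)):
--     idx = text.find(label)
--     if idx == -1:
--         return ""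
--     start = idx + len(label)
--     # single left-to-right scan: stop at the first position where any end marker starts
--     end = len(text)
--     for i in range(start, len(text)):
--         if any(text.startswith(e, i) for e in end_chars):
--             end = i
--             break
--     return text[start:end].strip(" :\t")
-- ===== Notes on version B (the rewrite author's own statement) =====
-- stated objective: alternative
-- what changed: Instead of calling text.find(e, start) once per end marker and taking the minimum, B makes a single left-to-right scan of the text from start and stops at the first position where any end marker begins.
import Mathlib
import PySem

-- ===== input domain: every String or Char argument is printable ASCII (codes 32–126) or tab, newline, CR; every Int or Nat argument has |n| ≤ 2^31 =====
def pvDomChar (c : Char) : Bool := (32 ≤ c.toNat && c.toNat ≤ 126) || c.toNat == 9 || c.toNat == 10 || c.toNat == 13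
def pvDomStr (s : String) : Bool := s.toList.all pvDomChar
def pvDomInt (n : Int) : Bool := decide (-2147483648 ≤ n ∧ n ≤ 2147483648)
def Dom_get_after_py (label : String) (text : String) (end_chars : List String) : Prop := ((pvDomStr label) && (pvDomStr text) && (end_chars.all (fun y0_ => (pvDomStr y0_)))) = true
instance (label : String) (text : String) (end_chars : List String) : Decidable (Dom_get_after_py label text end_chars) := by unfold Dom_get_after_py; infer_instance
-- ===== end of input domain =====

-- B replaces A's per-delimiter find-and-min loop by one left-to-right scan of the text that
-- stops at the first position where any end marker starts (objective: alternative decomposition).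

-- ===== PORT A =====
def get_after_py (label : String) (text : String) (end_chars : List String) : String :=
  let idx := PySem.Str.find text label
  if idx = -1 then ""
  else
    let start := idx + PySem.Str.len label
    let endv := end_chars.foldl (fun endv ch =>
        let tmp := PySem.Str.findFrom text ch start
        if tmp ≠ -1 then min endv tmp else endv) (PySem.Str.len text)
    PySem.Str.stripChars (PySem.Str.slice text (some start) (some endv)) " :\t"

-- ===== PORT B =====
-- the scan 'for i in range(start, len(text)): if any(text.startswith(e, i) for e in end_chars): end = i; break';
-- Python's text.startswith(e, i) with 0 ≤ i ≤ len(text) is exactly 'e is a prefix of text[i:]', ported as startswith on drop i.toNat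
def get_after_scan (cs : List Char) (ecs : List (List Char)) : List Int → Int → Int
  | [], d => d
  | i :: rest, d =>
    if ecs.any (fun e => PySem.Chars.startswith (cs.drop i.toNat) e) then i
    else get_after_scan cs ecs rest d

def get_after_py_alt (label : String) (text : String) (end_chars : List String) : String :=
  let idx := PySem.Str.find text label
  if idx = -1 then ""
  else
    let start := idx + PySem.Str.len label
    let endv := get_after_scan text.toList (end_chars.map (fun e => e.toList))
        (PySem.List.pyRange start (PySem.Str.len text)) (PySem.Str.len text)
    PySem.Str.stripChars (PySem.Str.slice text (some start) (some endv)) " :\t"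

-- ===== PRECONDITION & SPEC =====
def Spec_get_after_py (label : String) (text : String) (end_chars : List String) (out : String) : Prop := out = get_after_py_alt label text end_chars
instance (label : String) (text : String) (end_chars : List String) (out : String) : Decidable (Spec_get_after_py label text end_chars out) := by unfold Spec_get_after_py; infer_instance

-- ===== CLAIM (what is proved, stated in full; the proofs are below) =====
def Claim_equal_get_after_py : Prop := ∀ (label : String) (text : String) (end_chars : List String), Dom_get_after_py label text end_chars → Spec_get_after_py label text end_chars (get_after_py label text end_chars)

-- ===== LEMMAS AND PROOFS =====

-- 'some end marker starts at position i of cs'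
def pvHit (cs : List Char) (ecs : List (List Char)) (i : Nat) : Bool :=
  ecs.any (fun e => PySem.Chars.startswith (cs.drop i) e)

-- m is the first position in [s, n) where pvHit holds, n if none
def pvLeast (cs : List Char) (ecs : List (List Char)) (s n m : Nat) : Prop :=
  s ≤ m ∧ m ≤ n ∧ (∀ i, s ≤ i → i < m → pvHit cs ecs i = false) ∧ (m = n ∨ pvHit cs ecs m = true)

lemma pvLeast_unique {cs ecs s n m₁ m₂} (h₁ : pvLeast cs ecs s n m₁) (h₂ : pvLeast cs ecs s n m₂) :
    m₁ = m₂ := by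
  obtain ⟨hs₁, hn₁, hlo₁, hhit₁⟩ := h₁
  obtain ⟨hs₂, hn₂, hlo₂, hhit₂⟩ := h₂
  by_contra hne
  rcases Nat.lt_or_ge m₁ m₂ with h | h
  · have := hlo₂ m₁ hs₁ h
    rcases hhit₁ with rfl | hh
    · omega
    · simp [this] at hh
  · have hlt : m₂ < m₁ := by omega
    have := hlo₁ m₂ hs₂ hlt
    rcases hhit₂ with rfl | hh
    · omega
    · simp [this] at hh

lemma pvHit_true {cs ecs i} (h : pvHit cs ecs i = true) : ∃ e ∈ ecs, e <+: cs.drop i := by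
  rcases List.any_eq_true.mp h with ⟨e, he, hsw⟩
  exact ⟨e, he, (PySem.Chars.startswith_iff _ _).mp hsw⟩

lemma pvHit_of_prefix {cs ecs i} {e : List Char} (he : e ∈ ecs) (hp : e <+: cs.drop i) :
    pvHit cs ecs i = true :=
  List.any_eq_true.mpr ⟨e, he, (PySem.Chars.startswith_iff _ _).mpr hp⟩

-- B's scan computes the least hit position
lemma scan_least (cs : List Char) (ecs : List (List Char)) :
    ∀ k (s : Nat), k = (cs.length - s) → s ≤ cs.length →
      ∃ m : Nat, get_after_scan cs ecs (PySem.List.pyRange s cs.length) cs.length = (m : Int) ∧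
        pvLeast cs ecs s cs.length m := by
  intro k
  induction k with
  | zero =>
    intro s hk hs
    have hsn : s = cs.length := by omega
    have hnil : PySem.List.pyRange (s : Int) (cs.length : Int) = [] := by
      simp [PySem.List.pyRange]
      omega
    refine ⟨s, ?_, le_refl _, hs, ?_, Or.inl hsn⟩
    · rw [hnil]; simp [get_after_scan, hsn]
    · intro i h1 h2
      exact absurd h2 (by omega)
  | succ k ih =>
    intro s hk hs
    have hlt : s < cs.length := by omega
    rw [PySem.List.pyRange_one_cons (by exact_mod_cast hlt)]
    by_cases hhit : pvHit cs ecs s = true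
    · refine ⟨s, ?_, le_refl _, by omega, ?_, Or.inr hhit⟩
      · simp only [get_after_scan]
        rw [if_pos]
        simpa [pvHit, Int.toNat_natCast] using hhit
      · intro i h1 h2
        exact absurd h2 (by omega)
    · have hs1 : ((s : Int) + 1) = ((s + 1 : Nat) : Int) := by push_cast; ring
      rw [hs1]
      obtain ⟨m, heq, hm⟩ := ih (s + 1) (by omega) (by omega)
      refine ⟨m, ?_, by have := hm.1; omega, hm.2.1, ?_, hm.2.2.2⟩
      · simp only [get_after_scan]
        rw [if_neg, heq]
        simpa [pvHit, Int.toNat_natCast] using hhit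
      · intro i hi hilt
        rcases Nat.eq_or_lt_of_le hi with rfl | h
        · simpa using hhit
        · exact hm.2.2.1 i h hilt

-- A's find-and-min fold computes the same least hit position
lemma fold_least (cs : List Char) (ecs : List (List Char)) (s : Nat) (hs : s ≤ cs.length) :
    ∃ m : Nat,
      ecs.foldl (fun endv e =>
          let tmp := PySem.Chars.findFrom cs e (s : Int)
          if tmp ≠ -1 then min endv tmp else endv) ((cs.length : Nat) : Int) = (m : Int) ∧
        pvLeast cs ecs s cs.length m := by
  have hfold :
      ecs.foldl (fun endv e =>
          let tmp := PySem.Chars.findFrom cs e (s : Int)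
          if tmp ≠ -1 then min endv tmp else endv) ((cs.length : Nat) : Int)
        = ((ecs.filter (fun e => decide (PySem.Chars.findFrom cs e (s : Int) ≠ -1))).map
            (fun e => PySem.Chars.findFrom cs e (s : Int))).foldl min ((cs.length : Nat) : Int) := by
    rw [PySem.List.foldl_ite_eq_foldl_filter (p := fun e => PySem.Chars.findFrom cs e (s : Int) ≠ -1)
      (f := fun endv e => min endv (PySem.Chars.findFrom cs e (s : Int)))]
    rw [List.foldl_map]
  set vs := (ecs.filter (fun e => decide (PySem.Chars.findFrom cs e (s : Int) ≠ -1))).map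
      (fun e => PySem.Chars.findFrom cs e (s : Int)) with hvs
  set M := vs.foldl min ((cs.length : Nat) : Int) with hM
  have hmem_spec : ∀ y ∈ vs, ∃ e ∈ ecs, PySem.Chars.findFrom cs e (s : Int) = y ∧
      PySem.Chars.findFrom cs e (s : Int) ≠ -1 := by
    intro y hy
    rcases List.mem_map.mp hy with ⟨e, he, hye⟩
    rcases List.mem_filter.mp he with ⟨he', hf⟩
    exact ⟨e, he', hye, by simpa using hf⟩
  have hle := PySem.List.foldl_min_le vs ((cs.length : Nat) : Int)
  have hmm := PySem.List.foldl_min_mem vs ((cs.length : Nat) : Int)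
  rw [← hM] at hle hmm
  -- 0 ≤ M, s ≤ M
  have hsle : (s : Int) ≤ M := by
    rcases hmm with h | h
    · rw [h]; exact_mod_cast hs
    · rcases hmem_spec M h with ⟨e, _, hfe, hne⟩
      rw [← hfe]
      exact (PySem.Chars.findFrom_natCast_spec cs e s hs hne).1
  have hMnn : 0 ≤ M := le_trans (by exact_mod_cast Nat.zero_le s) hsle
  refine ⟨M.toNat, ?_, ?_, ?_, ?_, ?_⟩
  · rw [hfold]; exact (Int.toNat_of_nonneg hMnn).symm
  · omega
  · have := hle.1; omega
  · -- no hit strictly before M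
    intro i hi hilt
    by_contra hbad
    have hhit : pvHit cs ecs i = true := by
      cases h : pvHit cs ecs i
      · exact absurd h hbad
      · rfl
    rcases pvHit_true hhit with ⟨e, he, hp⟩
    -- e occurs at i ≥ s, hence findFrom ≠ -1 and findFrom ≤ i
    have hinf : e <:+: cs.drop s := by
      have hdd : (cs.drop s).drop (i - s) = cs.drop i := by
        rw [List.drop_drop]; congr 1; omega
      exact (hp.isInfix).trans (hdd ▸ (List.drop_suffix (i - s) (cs.drop s)).isInfix)
    have hne : PySem.Chars.findFrom cs e (s : Int) ≠ -1 := by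
      intro h
      exact ((PySem.Chars.findFrom_natCast_eq_neg_one_iff cs e s hs).mp h) hinf
    obtain ⟨hge, _, hfirst⟩ := PySem.Chars.findFrom_natCast_spec cs e s hs hne
    have hmemv : PySem.Chars.findFrom cs e (s : Int) ∈ vs := by
      refine List.mem_map.mpr ⟨e, List.mem_filter.mpr ⟨he, by simpa using hne⟩, rfl⟩
    have hMle := hle.2 _ hmemv
    -- i < M.toNat ≤ findFrom.toNat, contradicting minimality of findFrom
    have : i < (PySem.Chars.findFrom cs e (s : Int)).toNat := by omega
    exact hfirst i hi this hp
  · -- M = n or hit at M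
    rcases hmm with h | h
    · left; rw [h]; omega
    · right
      rcases hmem_spec M h with ⟨e, he, hfe, hne⟩
      obtain ⟨_, hpref, _⟩ := PySem.Chars.findFrom_natCast_spec cs e s hs hne
      rw [hfe] at hpref
      exact pvHit_of_prefix he hpref

-- ===== VERDICT (by name: the statement is the Claim_ definition above) =====
theorem get_after_py_spec : Claim_equal_get_after_py := by
  intro label text end_chars _
  unfold Spec_get_after_py get_after_py get_after_py_alt
  simp only [PySem.Str.find, PySem.Str.len, PySem.Str.findFrom_eq]
  set cs := text.toList with hcs
  set lbl := label.toList with hlbl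
  by_cases hidx : PySem.Chars.find cs lbl = -1
  · simp [hidx]
  · simp only [hidx, if_false]
    have h0 : 0 ≤ PySem.Chars.find cs lbl := by
      have := PySem.Chars.neg_one_le_find cs lbl
      omega
    obtain ⟨hpref, -⟩ := PySem.Chars.find_spec h0
    set idx := PySem.Chars.find cs lbl with hidxdef
    set s : Nat := idx.toNat + lbl.length with hsdef
    have hstart : idx + (lbl.length : Int) = (s : Int) := by
      rw [hsdef]; push_cast; rw [Int.toNat_of_nonneg h0]
    have hs : s ≤ cs.length := by
      have h1 : lbl.length ≤ (cs.drop idx.toNat).length := hpref.length_le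
      rw [List.length_drop] at h1
      have h0n : ((idx.toNat : Int)) = idx := Int.toNat_of_nonneg h0
      have hub := PySem.Chars.find_le_length cs lbl
      rw [← hidxdef] at hub
      omega
    rw [hstart]
    obtain ⟨mA, hA, hAleast⟩ := fold_least cs (end_chars.map (fun e => e.toList)) s hs
    obtain ⟨mB, hB, hBleast⟩ := scan_least cs (end_chars.map (fun e => e.toList))
      (cs.length - s) s rfl hs
    have hAB : mA = mB := pvLeast_unique hAleast hBleast
    have hAfold :
        end_chars.foldl (fun endv ch =>
            let tmp := PySem.Chars.findFrom cs ch.toList ((s : Nat) : Int)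
            if tmp ≠ -1 then min endv tmp else endv) ((cs.length : Nat) : Int)
          = (end_chars.map (fun e => e.toList)).foldl (fun endv e =>
            let tmp := PySem.Chars.findFrom cs e ((s : Nat) : Int)
            if tmp ≠ -1 then min endv tmp else endv) ((cs.length : Nat) : Int) := by
      rw [List.foldl_map]
    rw [hAfold, hA, hB, hAB]
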